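-- pv_equiv track=rewrite | github.com/CvanderStoep/adventofcode2023 | day13.py | horizontal_mirror
-- ===== SOURCE A (Python) =====
-- def pattern_size(pattern: list) -> (int, int):
--     rows = len(pattern)
--     cols = len(pattern[0])
--
--     return rows, cols
--
-- def horizontal_mirror(pattern: list) -> int:
--     """"returns the mirror row number or 0 if none exists; return row + 1 because the puzzle starts counting at 1"""
--     rows, cols = pattern_size(pattern)
--
--     for row_number in range(rows - 1):
--         top, bottom = row_number, row_number + 1
--         mirror = True
--         while top >= 0 and bottom < rows:
--             if pattern[top] != pattern[bottom]:
--                 mirror = False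
--                 break
--             top -= 1
--             bottom += 1
--         if mirror:
--             return row_number + 1
--     return 0
-- ===== SOURCE B (Python) =====
-- def horizontal_mirror(pattern: list) -> int:
--     """returns the mirror row number or 0 if none exists (1-based split index)"""
--     n = len(pattern)
--     for i in range(1, n):
--         if pattern[i - 1] == pattern[i]:
--             m = min(i, n - i)  # the reflection only has to reach the nearer boundary
--             if pattern[i - m:i][::-1] == pattern[i:i + m]:
--                 return i
--     return 0
-- ===== Notes on version B (the rewrite author's own statement) =====
-- stated objective: alternative
-- what changed: Replaces the two-pointer while loop with a mirror flag by, per candidate split (adjacent rows equal), one comparison of the boundary-bounded block below the split, reversed, against the block above it.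
import Mathlib
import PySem

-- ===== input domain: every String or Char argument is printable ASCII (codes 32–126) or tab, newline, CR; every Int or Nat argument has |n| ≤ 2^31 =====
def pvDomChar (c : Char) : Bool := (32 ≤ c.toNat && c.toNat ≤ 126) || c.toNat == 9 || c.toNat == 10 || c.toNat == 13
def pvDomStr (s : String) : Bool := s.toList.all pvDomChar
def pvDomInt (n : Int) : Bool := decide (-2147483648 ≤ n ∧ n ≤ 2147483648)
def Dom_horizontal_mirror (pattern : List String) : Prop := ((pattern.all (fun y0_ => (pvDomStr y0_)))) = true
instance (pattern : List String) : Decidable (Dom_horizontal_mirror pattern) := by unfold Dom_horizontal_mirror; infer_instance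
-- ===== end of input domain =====

-- B replaces A's two-pointer while loop (mirror flag, manual indexing) by one comparison,
-- per candidate split, of the boundary-bounded block below the split, reversed, against the
-- block above it (objective: alternative, same asymptotic cost). Pre_ excludes the empty
-- list, on which A raises IndexError (len(pattern[0])); B returns 0 there.


-- ===== PORT A =====
-- while top >= 0 and bottom < rows: compare pattern[top], pattern[bottom], move outwards
def aWhile (pattern : List String) (rows : Nat) (top : Int) (bottom : Nat) : Bool :=
  if 0 ≤ top ∧ bottom < rows then
    if PySem.List.pyGetD pattern top "" ≠ PySem.List.pyGetD pattern (bottom : Int) "" then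
      false                                   -- mirror = False; break
    else
      aWhile pattern rows (top - 1) (bottom + 1)
  else
    true                                      -- loop ended with mirror still True
termination_by rows - bottom
decreasing_by omega

-- for row_number in range(rows - 1): …
def aOuter (pattern : List String) (rows : Nat) : List Nat → Int
  | [] => 0
  | r :: rest =>
    if aWhile pattern rows (r : Int) (r + 1) then (r : Int) + 1
    else aOuter pattern rows rest

def horizontal_mirror (pattern : List String) : Int :=
  let rows := pattern.length                  -- cols = len(pattern[0]) raises on []: excluded by Pre_
  aOuter pattern rows (List.range (rows - 1))

-- ===== PORT B =====
-- m = min(i, n - i); pattern[i - m:i][::-1] == pattern[i:i + m]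
-- (slice indices are in range here, so pattern[a:b] is (drop a).take (b - a))
def mirrorAt (pattern : List String) (i : Nat) : Bool :=
  ((pattern.drop (i - min i (pattern.length - i))).take (min i (pattern.length - i))).reverse
    == (pattern.drop i).take (min i (pattern.length - i))

-- for i in range(1, n): if pattern[i-1] == pattern[i] and the reflected block matches: return i
def bLoop (pattern : List String) : List Nat → Int
  | [] => 0
  | i :: rest =>
    if (PySem.List.pyGetD pattern ((i : Int) - 1) "" == PySem.List.pyGetD pattern (i : Int) "")
        && mirrorAt pattern i then (i : Int)
    else bLoop pattern rest

def horizontal_mirror_alt (pattern : List String) : Int :=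
  bLoop pattern ((List.range (pattern.length - 1)).map (· + 1))

-- ===== PRECONDITION & SPEC =====
-- A evaluates len(pattern[0]) first: the empty list raises IndexError, everything else returns.
def Pre_horizontal_mirror (pattern : List String) : Prop := pattern ≠ []
instance (pattern : List String) : Decidable (Pre_horizontal_mirror pattern) := by unfold Pre_horizontal_mirror; infer_instance
def pvWitness_horizontal_mirror : List String := ["#.", "#."]

def Spec_horizontal_mirror (pattern : List String) (out : Int) : Prop := out = horizontal_mirror_alt pattern
instance (pattern : List String) (out : Int) : Decidable (Spec_horizontal_mirror pattern out) := by unfold Spec_horizontal_mirror; infer_instance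

-- ===== CLAIM (what is proved, stated in full; the proofs are below) =====
def Claim_equal_horizontal_mirror : Prop := ∀ (pattern : List String), Dom_horizontal_mirror pattern → Pre_horizontal_mirror pattern → Spec_horizontal_mirror pattern (horizontal_mirror pattern)

-- ===== LEMMAS AND PROOFS =====

-- one step of peeling the outermost element of a slice taken from an offset
lemma block_snoc {α : Type} (l : List α) (a m : Nat) :
    (l.drop a).take (m + 1) = (l.drop a).take m ++ (l[a + m]?).toList := by
  rw [List.take_add_one, List.getElem?_drop]

-- A's inner while loop compares the reversed block below the split against the block above it,
-- innermost pair first: it computes exactly B's list equality on the min-truncated slices.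
lemma aWhile_eq_blockEq (pattern : List String) :
    ∀ (n : Nat) (top : Int) (bottom : Nat), pattern.length - bottom ≤ n →
    top < pattern.length →
    aWhile pattern pattern.length top bottom =
      (((pattern.drop ((top + 1).toNat - min (top + 1).toNat (pattern.length - bottom))).take
          (min (top + 1).toNat (pattern.length - bottom))).reverse ==
        (pattern.drop bottom).take (min (top + 1).toNat (pattern.length - bottom))) := by
  intro n
  induction n with
  | zero =>
    intro top bottom hb _
    rw [aWhile]
    have hm : min (top + 1).toNat (pattern.length - bottom) = 0 := by omega
    simp [hm]
    omega
  | succ n ih =>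
    intro top bottom hb htl
    rw [aWhile]
    by_cases hc : 0 ≤ top ∧ bottom < pattern.length
    · obtain ⟨ht, hbl⟩ := hc
      have htn : top.toNat < pattern.length := by omega
      -- abbreviate the block length and its successor decomposition
      have hm1 : 1 ≤ min (top + 1).toNat (pattern.length - bottom) := by omega
      have hmsucc : min (top + 1).toNat (pattern.length - bottom) =
          min (top - 1 + 1).toNat (pattern.length - (bottom + 1)) + 1 := by omega
      have hoff : (top + 1).toNat - min (top + 1).toNat (pattern.length - bottom) =
          (top - 1 + 1).toNat - min (top - 1 + 1).toNat (pattern.length - (bottom + 1)) := by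
        omega
      -- the reversed lower block starts with pattern[top], the upper block with pattern[bottom]
      have hlow : (pattern.drop ((top + 1).toNat - min (top + 1).toNat (pattern.length - bottom))).take
            (min (top + 1).toNat (pattern.length - bottom)) =
          (pattern.drop ((top - 1 + 1).toNat - min (top - 1 + 1).toNat (pattern.length - (bottom + 1)))).take
            (min (top - 1 + 1).toNat (pattern.length - (bottom + 1))) ++ [pattern[top.toNat]] := by
        rw [hmsucc,
          show (top + 1).toNat - (min (top - 1 + 1).toNat (pattern.length - (bottom + 1)) + 1) =
            (top - 1 + 1).toNat - min (top - 1 + 1).toNat (pattern.length - (bottom + 1)) from by omega,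
          block_snoc,
          show (top - 1 + 1).toNat - min (top - 1 + 1).toNat (pattern.length - (bottom + 1)) +
            min (top - 1 + 1).toNat (pattern.length - (bottom + 1)) = top.toNat from by omega,
          List.getElem?_eq_getElem htn]
        rfl
      have hup : (pattern.drop bottom).take (min (top + 1).toNat (pattern.length - bottom)) =
          pattern[bottom] :: (pattern.drop (bottom + 1)).take
            (min (top - 1 + 1).toNat (pattern.length - (bottom + 1))) := by
        rw [List.drop_eq_getElem_cons hbl, hmsucc, List.take_succ_cons]
      have hg1 : PySem.List.pyGetD pattern top "" = pattern[top.toNat] :=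
        PySem.List.pyGetD_eq_getElem pattern "" ht (by omega)
      have hg2 : PySem.List.pyGetD pattern (bottom : Int) "" = pattern[bottom] := by
        rw [PySem.List.pyGetD_eq_getElem pattern "" (by omega) (by omega)]
        simp
      rw [if_pos (show (0:Int) ≤ top ∧ bottom < pattern.length from ⟨ht, hbl⟩), hg1, hg2,
        hlow, hup, List.reverse_append, List.reverse_singleton, List.singleton_append,
        List.cons_beq_cons]
      by_cases heq : pattern[top.toNat] = pattern[bottom]
      · rw [if_neg (by simp [heq]), ih (top - 1) (bottom + 1) (by omega) (by omega)]
        simp [heq]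
      · rw [if_pos heq]
        simp [heq]
    · have hm : min (top + 1).toNat (pattern.length - bottom) = 0 := by omega
      rw [if_neg hc]
      simp [hm]

-- a candidate block is nonempty for 1 ≤ i < length and its innermost pair is
-- a mirror's zip is nonempty for 1 ≤ i < length and its first pair is (pattern[i-1], pattern[i]),
-- so B's candidate guard is implied by the zip test
lemma guard_of_mirrorAt (pattern : List String) (j : Nat)
    (h2 : j + 1 < pattern.length) (hm : mirrorAt pattern (j + 1) = true) :
    pattern[j]'(by omega) = pattern[j + 1]'h2 := by
  unfold mirrorAt at hm
  have hms : min (j + 1) (pattern.length - (j + 1)) =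
      (min (j + 1) (pattern.length - (j + 1)) - 1) + 1 := by omega
  rw [hms,
    show (j + 1) - ((min (j + 1) (pattern.length - (j + 1)) - 1) + 1) =
      (j + 1) - min (j + 1) (pattern.length - (j + 1)) from by omega,
    block_snoc,
    show (j + 1) - min (j + 1) (pattern.length - (j + 1)) +
      (min (j + 1) (pattern.length - (j + 1)) - 1) = j from by omega,
    List.getElem?_eq_getElem (show j < pattern.length from by omega),
    List.drop_eq_getElem_cons h2, List.take_succ_cons] at hm
  simp only [Option.toList_some, List.reverse_append, List.reverse_singleton,
    List.singleton_append, List.cons_beq_cons, Bool.and_eq_true, beq_iff_eq] at hm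
  exact hm.1

-- the outer loops agree element-wise
lemma outer_eq (pattern : List String) :
    ∀ l : List Nat, (∀ r ∈ l, r + 2 ≤ pattern.length) →
    aOuter pattern pattern.length l = bLoop pattern (l.map (· + 1)) := by
  intro l
  induction l with
  | nil => intro _; rfl
  | cons r rest ih =>
    intro h
    have hr : r + 2 ≤ pattern.length := h r (by simp)
    have hw : aWhile pattern pattern.length (r : Int) (r + 1) = mirrorAt pattern (r + 1) := by
      rw [aWhile_eq_blockEq pattern (pattern.length) (r : Int) (r + 1) (by omega) (by omega)]
      unfold mirrorAt
      have h1 : ((r : Int) + 1).toNat = r + 1 := by omega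
      rw [h1]
    simp only [aOuter, bLoop, List.map_cons, hw]
    by_cases hm : mirrorAt pattern (r + 1)
    · have hd1 : r < pattern.length := by omega
      have hd2 : r + 1 < pattern.length := by omega
      have hgeq : pattern[r] = pattern[r + 1] := guard_of_mirrorAt pattern r hd2 hm
      have hcast : ((r : Int) + 1) = (((r + 1 : Nat)) : Int) := by push_cast; ring
      have hgb : (PySem.List.pyGetD pattern (((r + 1 : Nat) : Int) - 1) "" ==
          PySem.List.pyGetD pattern (((r + 1 : Nat) : Int)) "") = true := by
        have h1 : (((r + 1 : Nat) : Int) - 1) = ((r : Nat) : Int) := by push_cast; ring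
        rw [h1, PySem.List.pyGetD_natCast, PySem.List.pyGetD_natCast,
          List.getD_eq_getElem _ _ hd1, List.getD_eq_getElem _ _ hd2, hgeq]
        simp
      simp only [hm, hgb, Bool.and_self, if_true]
      exact hcast
    · simp [hm, ih (fun x hx => h x (by simp [hx]))]

-- ===== VERDICT (by name: the statement is the Claim_ definition above) =====
theorem horizontal_mirror_spec : Claim_equal_horizontal_mirror := by
  intro pattern _ _
  unfold Spec_horizontal_mirror horizontal_mirror horizontal_mirror_alt
  exact outer_eq pattern (List.range (pattern.length - 1))
    (fun r hr => by have := List.mem_range.mp hr; omega)
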